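-- pv_equiv track=rewrite | github.com/Alys9999/ICS33 | program1/p1a.py | all_influenced
-- ===== SOURCE A (Python) =====
-- import math
--
-- def all_influenced(rela_d,input_name_s):
--     c=0
--     infl_dict={}
--     for k in rela_d.keys():
--         if k in input_name_s:
--             infl_dict[k]=True
--             c+=1
--         else:
--             infl_dict[k]=False
--     while True:
--         t_count=0
--         for k_two in infl_dict.keys():
--             m=math.ceil(len(rela_d[k_two])/2)
--             if infl_dict[k_two]==False:
--                 infl_n=0
--                 for i in rela_d[k_two]:
--                     if i in input_name_s:
--                         infl_n+=1
--                 if infl_n>=m: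
--                     infl_dict[k_two]=True
--                 if k_two not in input_name_s and rela_d[k_two]==[]:
--                     infl_dict[k_two]=False
--         for v in infl_dict.values():
--             if v==True:
--                 t_count=t_count+1
--         if c==t_count:
--             re=filter(lambda x: infl_dict[x]==True, list(infl_dict.keys()))
--             s=set(re)
--             return s
--         else:
--             c=t_count
-- ===== SOURCE B (Python) =====
-- def all_influenced(rela_d, input_name_s):
--     result = set()
--     for k, rels in rela_d.items():
--         if k in input_name_s:
--             result.add(k)
--         elif rels and 2 * sum(1 for i in rels if i in input_name_s) >= len(rels):
--             result.add(k)
--     return result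
-- ===== Notes on version B (the rewrite author's own statement) =====
-- stated objective: simpler
-- what changed: Replaced the while-True fixpoint loop with its c/t_count convergence bookkeeping and boolean dict by one direct pass over the dict items that adds a key to the result set iff it is in input_name_s or has a non-empty relation list at least half of which is in input_name_s (labels never propagate, so the fixpoint is reached after one pass).
import Mathlib
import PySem

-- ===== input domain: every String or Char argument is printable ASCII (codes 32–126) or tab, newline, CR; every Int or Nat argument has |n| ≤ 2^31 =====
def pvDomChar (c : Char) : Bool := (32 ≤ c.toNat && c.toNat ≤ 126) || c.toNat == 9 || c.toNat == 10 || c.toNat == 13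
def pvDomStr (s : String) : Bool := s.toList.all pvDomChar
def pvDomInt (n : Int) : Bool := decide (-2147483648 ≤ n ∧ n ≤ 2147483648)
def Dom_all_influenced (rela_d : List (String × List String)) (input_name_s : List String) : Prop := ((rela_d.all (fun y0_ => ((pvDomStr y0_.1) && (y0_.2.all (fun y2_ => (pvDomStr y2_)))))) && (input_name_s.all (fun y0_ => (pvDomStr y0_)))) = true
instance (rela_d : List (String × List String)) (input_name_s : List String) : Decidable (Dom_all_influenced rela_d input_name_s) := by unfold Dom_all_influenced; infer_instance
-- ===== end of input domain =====

-- B replaces A's while-True fixpoint loop and convergence bookkeeping by one direct pass over the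
-- dict items (labels never propagate, so the fixpoint is reached after one pass): simpler.

-- ===== PORT A =====
-- one pass of A's inner `for k_two in infl_dict.keys()` loop (keys of infl_dict = keys of rela_d)
def pvPassA (rela : PySem.Dict String (List String)) (S : List String)
    (d : PySem.Dict String Bool) : PySem.Dict String Bool :=
  d.keys.foldl (fun d k2 =>
    let rels := rela.getD k2 []      -- rela_d[k_two]; k2 is always a key of rela, so getD [] is exact
    let m : Int := (((rels.length + 1) / 2 : Nat) : Int)   -- math.ceil(len(...)/2), exact here
    if d.getD k2 false = false then
      let infl_n : Int := rels.foldl (fun n i => if S.contains i then n + 1 else n) 0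
      let d1 := if infl_n ≥ m then d.insert k2 true else d
      if !S.contains k2 && decide (rels = []) then d1.insert k2 false else d1
    else d) d

-- `for v in infl_dict.values(): if v==True: t_count+=1`
def pvCountT (d : PySem.Dict String Bool) : Int :=
  d.values.foldl (fun t v => if v = true then t + 1 else t) 0

-- the `while True:` loop; fuel is a totality guard only (the loop provably returns within two passes)
def pvLoopA (rela : PySem.Dict String (List String)) (S : List String) :
    Nat → Int → PySem.Dict String Bool → List String
  | 0, _, _ => []
  | f + 1, c, d =>
    let d' := pvPassA rela S d
    let t := pvCountT d'
    if c = t then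
      PySem.Set.ofList (d'.keys.filter (fun x => d'.getD x false == true))
    else pvLoopA rela S f t d'

def all_influenced (rela_d : List (String × List String)) (input_name_s : List String) : List String :=
  let rela := PySem.Dict.ofList rela_d
  let init := rela.keys.foldl
    (fun (p : Int × PySem.Dict String Bool) k =>
      if input_name_s.contains k then (p.1 + 1, p.2.insert k true)
      else (p.1, p.2.insert k false))
    ((0 : Int), PySem.Dict.empty)
  pvLoopA rela input_name_s (rela_d.length + 2) init.1 init.2

-- ===== PORT B =====
def all_influenced_alt (rela_d : List (String × List String)) (input_name_s : List String) : List String :=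
  (PySem.Dict.ofList rela_d).items.foldl
    (fun (result : PySem.Set String) kv =>
      if input_name_s.contains kv.1 then result.add kv.1
      else if decide (kv.2 ≠ []) &&
          decide (2 * (kv.2.map (fun i => if input_name_s.contains i then (1 : Int) else 0)).sum
            ≥ (kv.2.length : Int)) then result.add kv.1
      else result)
    PySem.Set.empty

-- ===== PRECONDITION & SPEC =====
def Spec_all_influenced (rela_d : List (String × List String)) (input_name_s : List String) (out : List String) : Prop := out = all_influenced_alt rela_d input_name_s
instance (rela_d : List (String × List String)) (input_name_s : List String) (out : List String) : Decidable (Spec_all_influenced rela_d input_name_s out) := by unfold Spec_all_influenced; infer_instance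

-- ===== CLAIM (what is proved, stated in full; the proofs are below) =====
def Claim_equal_all_influenced : Prop := ∀ (rela_d : List (String × List String)) (input_name_s : List String), Dom_all_influenced rela_d input_name_s → Spec_all_influenced rela_d input_name_s (all_influenced rela_d input_name_s)


-- ===== LEMMAS AND PROOFS =====

def pvNew (rela : PySem.Dict String (List String)) (S : List String) (k : String) (v : Bool) : Bool :=
  if v = false then
    if !S.contains k && decide (rela.getD k [] = []) then false
    else decide (((rela.getD k []).foldl (fun n i => if S.contains i then n + 1 else n) 0 : Int)
        ≥ ((((rela.getD k []).length + 1) / 2 : Nat) : Int))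
  else true
def pvStepA (rela : PySem.Dict String (List String)) (S : List String)
    (d : PySem.Dict String Bool) (k2 : String) : PySem.Dict String Bool :=
  if d.getD k2 false = false then
    if !S.contains k2 && decide (rela.getD k2 [] = []) then
      (if ((rela.getD k2 []).foldl (fun n i => if S.contains i then n + 1 else n) 0 : Int)
          ≥ ((((rela.getD k2 []).length + 1) / 2 : Nat) : Int) then d.insert k2 true else d).insert k2 false
    else
      if ((rela.getD k2 []).foldl (fun n i => if S.contains i then n + 1 else n) 0 : Int)
          ≥ ((((rela.getD k2 []).length + 1) / 2 : Nat) : Int) then d.insert k2 true else d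
  else d

lemma pv_step_items (rela : PySem.Dict String (List String)) (S : List String)
    (d : PySem.Dict String Bool) (k : String) (hnd : d.keys.Nodup) (hc : d.contains k = true) :
    (pvStepA rela S d k).items
      = d.items.map (fun p => if p.1 = k then (k, pvNew rela S k p.2) else p) := by
  have hval : ∀ p ∈ d.items, p.1 = k → p.2 = d.getD k false := by
    rintro ⟨p1, p2⟩ hp rfl
    exact (PySem.Dict.getD_of_mem_items d hp hnd false).symm
  by_cases hb : d.getD k false = false
  · by_cases hov : (!S.contains k && decide (rela.getD k [] = [])) = true
    · have hpv : pvNew rela S k false = false := by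
        rw [pvNew, if_pos rfl, if_pos hov]
      by_cases hm : ((rela.getD k []).foldl (fun n i => if S.contains i then n + 1 else n) 0 : Int)
          ≥ ((((rela.getD k []).length + 1) / 2 : Nat) : Int)
      · rw [pvStepA, if_pos hb, if_pos hov, if_pos hm,
          PySem.Dict.items_insert_of_contains (d.insert k true) false
            (by rw [PySem.Dict.contains_insert]; simp),
          PySem.Dict.items_insert_of_contains d true hc, List.map_map]
        refine List.map_congr_left ?_
        rintro ⟨p1, p2⟩ hp
        by_cases h : p1 = k
        · subst h
          have hp2 : p2 = false := (hval _ hp rfl).trans hb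
          subst hp2; simp [hpv]
        · simp [h]
      · rw [pvStepA, if_pos hb, if_pos hov, if_neg hm,
          PySem.Dict.items_insert_of_contains d false hc]
        refine List.map_congr_left ?_
        rintro ⟨p1, p2⟩ hp
        by_cases h : p1 = k
        · subst h
          have hp2 : p2 = false := (hval _ hp rfl).trans hb
          subst hp2; simp [hpv]
        · simp [h]
    · by_cases hm : ((rela.getD k []).foldl (fun n i => if S.contains i then n + 1 else n) 0 : Int)
          ≥ ((((rela.getD k []).length + 1) / 2 : Nat) : Int)
      · have hpv : pvNew rela S k false = true := by
          rw [pvNew, if_pos rfl, if_neg hov]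
          exact decide_eq_true hm
        rw [pvStepA, if_pos hb, if_neg hov, if_pos hm,
          PySem.Dict.items_insert_of_contains d true hc]
        refine List.map_congr_left ?_
        rintro ⟨p1, p2⟩ hp
        by_cases h : p1 = k
        · subst h
          have hp2 : p2 = false := (hval _ hp rfl).trans hb
          subst hp2; simp [hpv]
        · simp [h]
      · have hpv : pvNew rela S k false = false := by
          rw [pvNew, if_pos rfl, if_neg hov]
          exact decide_eq_false hm
        rw [pvStepA, if_pos hb, if_neg hov, if_neg hm]
        refine ((List.map_congr_left ?_).trans (List.map_id _)).symm
        rintro ⟨p1, p2⟩ hp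
        by_cases h : p1 = k
        · subst h
          have hp2 : p2 = false := (hval _ hp rfl).trans hb
          subst hp2; simp [hpv]
        · simp [h]
  · have hbt : d.getD k false = true := by revert hb; cases d.getD k false <;> simp
    have hpv : pvNew rela S k true = true := by rw [pvNew]; simp
    rw [pvStepA, if_neg hb]
    refine ((List.map_congr_left ?_).trans (List.map_id _)).symm
    rintro ⟨p1, p2⟩ hp
    by_cases h : p1 = k
    · subst h
      have hp2 : p2 = true := (hval _ hp rfl).trans hbt
      subst hp2; simp [hpv]
    · simp [h]

lemma pv_fold_items (rela : PySem.Dict String (List String)) (S : List String) :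
    ∀ (l : List String) (d : PySem.Dict String Bool), d.keys.Nodup → l.Nodup →
    (∀ k ∈ l, d.contains k = true) →
    (l.foldl (pvStepA rela S) d).items
      = d.items.map (fun p => if p.1 ∈ l then (p.1, pvNew rela S p.1 p.2) else p) := by
  intro l
  induction l with
  | nil =>
    intro d _ _ _
    simp
  | cons k l ih =>
    intro d hnd hl hc
    have hck : d.contains k = true := hc k (by simp)
    have hkl : k ∉ l := (List.nodup_cons.mp hl).1
    have hstep := pv_step_items rela S d k hnd hck
    have hkeys : (pvStepA rela S d k).keys = d.keys := by
      simp only [PySem.Dict.keys, hstep, List.map_map]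
      refine List.map_congr_left ?_
      rintro ⟨p1, p2⟩ _
      by_cases h : p1 = k <;> simp [h]
    rw [List.foldl_cons, ih (pvStepA rela S d k) (by rw [hkeys]; exact hnd)
      (List.nodup_cons.mp hl).2
      (by intro k' hk'
          rw [PySem.Dict.contains_eq_decide_mem_keys, hkeys,
            ← PySem.Dict.contains_eq_decide_mem_keys]
          exact hc k' (by simp [hk'])),
      hstep, List.map_map]
    refine List.map_congr_left ?_
    rintro ⟨p1, p2⟩ _
    by_cases h : p1 = k
    · subst h
      simp [hkl]
    · by_cases h2 : p1 ∈ l <;> simp [h, h2]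

def pvPassA' (rela : PySem.Dict String (List String)) (S : List String)
    (d : PySem.Dict String Bool) : PySem.Dict String Bool :=
  d.keys.foldl (pvStepA rela S) d

lemma pv_pass_items (rela : PySem.Dict String (List String)) (S : List String)
    (ks : List String) (g : String → Bool) (d : PySem.Dict String Bool)
    (hitems : d.items = ks.map (fun k => (k, g k))) (hnd : ks.Nodup) :
    (pvPassA' rela S d).items = ks.map (fun k => (k, pvNew rela S k (g k))) := by
  have hkeys : d.keys = ks := by
    simp [PySem.Dict.keys, hitems, List.map_map, Function.comp_def]
  rw [pvPassA', hkeys,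
    pv_fold_items rela S ks d (by rw [hkeys]; exact hnd) hnd
      (by intro k hk
          rw [PySem.Dict.contains_eq_decide_mem_keys, hkeys]
          simpa using hk),
    hitems, List.map_map]
  refine List.map_congr_left ?_
  intro k hk
  simp [hk]

lemma pvNew_cond (rela : PySem.Dict String (List String)) (S : List String) (k : String) :
    pvNew rela S k (pvNew rela S k (S.contains k)) = pvNew rela S k (S.contains k) := by
  cases hS : S.contains k
  · cases hb : pvNew rela S k false
    · rw [hb]
    · rw [pvNew]; simp
  · have h1 : pvNew rela S k true = true := by rw [pvNew]; simp
    rw [h1, h1]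

lemma pvPassA_eq (rela : PySem.Dict String (List String)) (S : List String)
    (d : PySem.Dict String Bool) : pvPassA rela S d = pvPassA' rela S d := rfl

lemma pvCountT_eq (d : PySem.Dict String Bool) :
    pvCountT d = (d.items.map (fun p => p.2)).foldl (fun t v => if v = true then t + 1 else t) 0 := rfl

def pvCond (rela : PySem.Dict String (List String)) (S : List String) (k : String) : Bool :=
  pvNew rela S k (S.contains k)

lemma pv_loop (rela : PySem.Dict String (List String)) (S : List String)
    (ks : List String) (hnd : ks.Nodup) :
    ∀ (f : Nat) (c : Int) (d : PySem.Dict String Bool),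
    d.items = ks.map (fun k => (k, S.contains k)) →
    pvLoopA rela S (f + 2) c d = PySem.Set.ofList (ks.filter (fun k => pvCond rela S k)) := by
  intro f c d hitems
  have h1 : (pvPassA rela S d).items = ks.map (fun k => (k, pvCond rela S k)) := by
    rw [pvPassA_eq]
    exact pv_pass_items rela S ks (fun k => S.contains k) d hitems hnd
  have h2 : (pvPassA rela S (pvPassA rela S d)).items = ks.map (fun k => (k, pvCond rela S k)) := by
    rw [pvPassA_eq,
      pv_pass_items rela S ks (fun k => pvCond rela S k) (pvPassA rela S d) h1 hnd]
    exact List.map_congr_left (fun k _ => by rw [pvCond, pvNew_cond])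
  have hfilter : ∀ d' : PySem.Dict String Bool,
      d'.items = ks.map (fun k => (k, pvCond rela S k)) →
      PySem.Set.ofList (d'.keys.filter (fun x => d'.getD x false == true))
        = PySem.Set.ofList (ks.filter (fun k => pvCond rela S k)) := by
    intro d' h
    have hk : d'.keys = ks := by
      simp [PySem.Dict.keys, h, List.map_map, Function.comp_def]
    rw [hk]
    congr 1
    refine List.filter_congr ?_
    intro x hx
    have hmem : (x, pvCond rela S x) ∈ d'.items := by
      rw [h]; exact List.mem_map.mpr ⟨x, hx, rfl⟩
    rw [PySem.Dict.getD_of_mem_items d' hmem (by rw [hk]; exact hnd) false]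
    cases pvCond rela S x <;> simp
  have hcnt : pvCountT (pvPassA rela S (pvPassA rela S d)) = pvCountT (pvPassA rela S d) := by
    rw [pvCountT_eq, pvCountT_eq, h2, h1]
  show pvLoopA rela S (f + 1 + 1) c d = _
  rw [pvLoopA]
  by_cases hc : c = pvCountT (pvPassA rela S d)
  · simp only [hc]
    exact hfilter _ h1
  · simp only [if_neg hc]
    show pvLoopA rela S (f + 1) _ _ = _
    rw [pvLoopA]
    simp only [hcnt]
    exact hfilter _ h2

lemma pv_b_fold (P : String × List String → Bool) :
    ∀ (l : List (String × List String)) (s : PySem.Set String),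
    l.foldl (fun r kv => if P kv then r.add kv.1 else r) s
      = (l.filter P).foldl (fun r kv => r.add kv.1) s := by
  intro l
  induction l with
  | nil => intro s; rfl
  | cons kv l ih =>
    intro s
    by_cases h : P kv = true <;> simp [h, ih]

lemma pv_cond_eq (rela : PySem.Dict String (List String)) (S : List String) (k : String) :
    (S.contains k || (decide (rela.getD k [] ≠ []) &&
      decide (2 * ((rela.getD k []).map (fun i => if S.contains i then (1 : Int) else 0)).sum
        ≥ ((rela.getD k []).length : Int))))
      = pvCond rela S k := by
  cases hS : S.contains k
  · simp only [Bool.false_or]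
    by_cases hr : rela.getD k [] = []
    · rw [pvCond, hS, pvNew, if_pos rfl, if_pos (by rw [hS]; simp [hr])]
      simp [hr]
    · rw [pvCond, hS, pvNew, if_pos rfl, if_neg (by simp [hr])]
      rw [PySem.List.sum_map_ite_one_zero, PySem.List.foldl_count_if]
      simp only [zero_add, hr, ne_eq, not_false_iff, decide_true, Bool.true_and]
      rw [decide_eq_decide]
      constructor <;> intro h <;> omega
  · rw [pvCond, hS, pvNew]
    simp
lemma pv_init_items (S : List String) (ks : List String) : ∀ (p : Int × PySem.Dict String Bool),
    ks.Nodup → (∀ k ∈ ks, p.2.contains k = false) →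
    (ks.foldl (fun p k => if S.contains k then (p.1 + 1, p.2.insert k true)
        else (p.1, p.2.insert k false)) p).2.items
      = p.2.items ++ ks.map (fun k => (k, S.contains k)) := by
  induction ks with
  | nil => intro p _ _; simp
  | cons k ks ih =>
    intro p hnd hc
    have hck : p.2.contains k = false := hc k (by simp)
    have h2 : (if S.contains k then (p.1 + 1, p.2.insert k true)
        else (p.1, p.2.insert k false))
        = ((if S.contains k then p.1 + 1 else p.1 : Int), p.2.insert k (S.contains k)) := by
      cases h : S.contains k <;> simp
    rw [List.foldl_cons, h2, ih]
    · rw [PySem.Dict.items_insert_of_not_contains p.2 (S.contains k) hck]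
      simp
    · exact hnd.of_cons
    · intro k' hk'
      rw [PySem.Dict.contains_insert]
      have hne : k' ≠ k := by
        rintro rfl; exact (List.nodup_cons.mp hnd).1 hk'
      simp [hne, hc k' (by simp [hk'])]

lemma pv_b_fn (S : List String) :
    (fun (result : PySem.Set String) (kv : String × List String) =>
      if S.contains kv.1 then result.add kv.1
      else if decide (kv.2 ≠ []) &&
          decide (2 * (kv.2.map (fun i => if S.contains i then (1 : Int) else 0)).sum
            ≥ (kv.2.length : Int)) then result.add kv.1
      else result)
    = (fun (r : PySem.Set String) kv =>
        if (S.contains kv.1 || (decide (kv.2 ≠ []) &&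
          decide (2 * (kv.2.map (fun i => if S.contains i then (1 : Int) else 0)).sum
            ≥ (kv.2.length : Int)))) then r.add kv.1 else r) := by
  funext r kv
  cases h1 : S.contains kv.1 <;> simp

lemma pv_fold_add_fst (l : List (String × List String)) (s : PySem.Set String) :
    l.foldl (fun r kv => r.add kv.1) s
      = List.foldl PySem.Set.add s (l.map (fun kv => kv.1)) := by
  rw [List.foldl_map]

-- ===== VERDICT (by name: the statement is the Claim_ definition above) =====
theorem all_influenced_spec : Claim_equal_all_influenced := by
  intro rela_d S _hdom
  show all_influenced rela_d S = all_influenced_alt rela_d S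
  simp only [all_influenced, all_influenced_alt]
  have hnd : (PySem.Dict.ofList rela_d).keys.Nodup := PySem.Dict.nodup_keys_ofList _
  have hinit := pv_init_items S (PySem.Dict.ofList rela_d).keys
    ((0 : Int), (PySem.Dict.empty : PySem.Dict String Bool)) hnd
    (by intro k _; exact PySem.Dict.contains_empty k)
  rw [pv_loop (PySem.Dict.ofList rela_d) S (PySem.Dict.ofList rela_d).keys hnd rela_d.length _ _
    (by rw [hinit]; rfl)]
  rw [pv_b_fn, pv_b_fold, pv_fold_add_fst,
    show (PySem.Set.empty : PySem.Set String) = [] from rfl, ← PySem.Set.ofList_eq_foldl,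
    PySem.Dict.items_eq_map_keys (PySem.Dict.ofList rela_d) hnd [], List.filter_map,
    List.map_map]
  congr 1
  simp only [Function.comp_def, List.map_id']
  refine (List.filter_congr ?_).symm
  intro k _
  exact pv_cond_eq (PySem.Dict.ofList rela_d) S k
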